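-- pv_equiv track=rewrite | github.com/ModerRAS/mountblade-code | TaleWorlds.Native/src/scripts/replace_variable_names.py | replace_module_data_pointers
-- ===== SOURCE A (Python) =====
-- def replace_module_data_pointers(content):
--     """替换SystemModuleDataPointer系列变量"""
--     replacements = {
--         'SystemModuleDataPointer08': 'SystemModuleDataPointerParticleCore',
--         'SystemModuleDataPointer09': 'SystemModuleDataPointerAudioEngine',
--         'SystemModuleDataPointer10': 'SystemModuleDataPointerGraphicsEngine',
--         'SystemModuleDataPointer11': 'SystemModuleDataPointerPhysicsEngine',
--         'SystemModuleDataPointer12': 'SystemModuleDataPointerNetworkEngine',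
--         'SystemModuleDataPointer13': 'SystemModuleDataPointerInputEngine',
--         'SystemModuleDataPointer14': 'SystemModuleDataPointerResourceEngine',
--         'SystemModuleDataPointer15': 'SystemModuleDataPointerAnimationEngine',
--         'SystemModuleDataPointer16': 'SystemModuleDataPointerParticleEngine',
--         'SystemModuleDataPointer17': 'SystemModuleDataPointerSystemCore',
--         'SystemModuleDataPointer18': 'SystemModuleDataPointerSystemEngine',
--         'SystemModuleDataPointer19': 'SystemModuleDataPointerRenderCore',
--         'SystemModuleDataPointer20': 'SystemModuleDataPointerRenderEngine'
--     }
--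
--     for old_name, new_name in replacements.items():
--         content = content.replace(old_name, new_name)
--
--     return content
-- ===== SOURCE B (Python) =====
-- def replace_module_data_pointers(content):
--     """替换SystemModuleDataPointer系列变量 — single left-to-right scan with one suffix table"""
--     PREFIX = 'SystemModuleDataPointer'
--     names = {
--         '08': 'ParticleCore', '09': 'AudioEngine', '10': 'GraphicsEngine',
--         '11': 'PhysicsEngine', '12': 'NetworkEngine', '13': 'InputEngine',
--         '14': 'ResourceEngine', '15': 'AnimationEngine', '16': 'ParticleEngine',
--         '17': 'SystemCore', '18': 'SystemEngine', '19': 'RenderCore',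
--         '20': 'RenderEngine',
--     }
--     out = []
--     i = 0
--     n = len(content)
--     while i < n:
--         if content.startswith(PREFIX, i) and content[i + 23:i + 25] in names:
--             out.append(PREFIX + names[content[i + 23:i + 25]])
--             i += 25
--         else:
--             out.append(content[i])
--             i += 1
--     return ''.join(out)
-- ===== Notes on version B (the rewrite author's own statement) =====
-- stated objective: alternative
-- what changed: A runs 13 sequential full-string str.replace passes (one per numbered pointer name); B makes a single left-to-right scan that, at each position, matches the shared 23-char prefix and looks the following two digit characters up in a table, emitting the replacement and skipping the whole 25-char key.
import Mathlib
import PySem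

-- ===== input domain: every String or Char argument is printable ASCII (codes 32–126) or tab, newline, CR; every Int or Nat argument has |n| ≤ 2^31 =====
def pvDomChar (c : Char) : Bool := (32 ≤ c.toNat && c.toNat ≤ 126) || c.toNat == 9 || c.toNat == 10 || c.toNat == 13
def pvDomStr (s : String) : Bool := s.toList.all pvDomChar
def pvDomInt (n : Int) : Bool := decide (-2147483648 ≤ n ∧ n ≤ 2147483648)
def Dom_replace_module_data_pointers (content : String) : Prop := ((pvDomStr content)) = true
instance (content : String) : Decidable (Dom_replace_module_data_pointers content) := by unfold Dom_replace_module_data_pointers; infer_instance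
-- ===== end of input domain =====

-- B replaces A's 13 sequential full-string str.replace passes by ONE left-to-right scan that looks the
-- two digit characters after the shared prefix up in a table; same return value on every input (A is total).

-- ===== PORT A =====
-- the Python dict `replacements`, in insertion order
def pvReplacements : PySem.Dict String String :=
  PySem.Dict.ofList [
    ("SystemModuleDataPointer08", "SystemModuleDataPointerParticleCore"),
    ("SystemModuleDataPointer09", "SystemModuleDataPointerAudioEngine"),
    ("SystemModuleDataPointer10", "SystemModuleDataPointerGraphicsEngine"),
    ("SystemModuleDataPointer11", "SystemModuleDataPointerPhysicsEngine"),
    ("SystemModuleDataPointer12", "SystemModuleDataPointerNetworkEngine"),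
    ("SystemModuleDataPointer13", "SystemModuleDataPointerInputEngine"),
    ("SystemModuleDataPointer14", "SystemModuleDataPointerResourceEngine"),
    ("SystemModuleDataPointer15", "SystemModuleDataPointerAnimationEngine"),
    ("SystemModuleDataPointer16", "SystemModuleDataPointerParticleEngine"),
    ("SystemModuleDataPointer17", "SystemModuleDataPointerSystemCore"),
    ("SystemModuleDataPointer18", "SystemModuleDataPointerSystemEngine"),
    ("SystemModuleDataPointer19", "SystemModuleDataPointerRenderCore"),
    ("SystemModuleDataPointer20", "SystemModuleDataPointerRenderEngine")]

-- the for-loop `for old_name, new_name in replacements.items(): content = content.replace(old_name, new_name)`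
def replace_module_data_pointers (content : String) : String :=
  pvReplacements.items.foldl (fun acc p => PySem.Str.replace acc p.1 p.2) content

-- ===== PORT B =====
def pvPrefixB : String := "SystemModuleDataPointer"

-- the dict `names` of Source B (two digit characters -> module name)
def pvNamesB : PySem.Dict String String :=
  PySem.Dict.ofList [
    ("08", "ParticleCore"),
    ("09", "AudioEngine"),
    ("10", "GraphicsEngine"),
    ("11", "PhysicsEngine"),
    ("12", "NetworkEngine"),
    ("13", "InputEngine"),
    ("14", "ResourceEngine"),
    ("15", "AnimationEngine"),
    ("16", "ParticleEngine"),
    ("17", "SystemCore"),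
    ("18", "SystemEngine"),
    ("19", "RenderCore"),
    ("20", "RenderEngine")]

-- the while-loop of Source B over the remaining characters: match prefix + two-char table key, else copy one char
def pvScanB : List Char → List Char
  | [] => []
  | c :: t =>
    if pvPrefixB.toList.isPrefixOf (c :: t)
        && (pvNamesB.get? (String.ofList (((c :: t).drop 23).take 2))).isSome then
      pvPrefixB.toList ++ ((pvNamesB.get? (String.ofList (((c :: t).drop 23).take 2))).getD "").toList
        ++ pvScanB ((c :: t).drop 25)
    else
      c :: pvScanB t
  termination_by l => l.length
  decreasing_by
  all_goals simp

def replace_module_data_pointers_alt (content : String) : String :=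
  String.ofList (pvScanB content.toList)

-- ===== PRECONDITION & SPEC =====
def Spec_replace_module_data_pointers (content : String) (out : String) : Prop := out = replace_module_data_pointers_alt content
instance (content : String) (out : String) : Decidable (Spec_replace_module_data_pointers content out) := by unfold Spec_replace_module_data_pointers; infer_instance

-- ===== CLAIM (what is proved, stated in full; the proofs are below) =====
def Claim_equal_replace_module_data_pointers : Prop := ∀ (content : String), Dom_replace_module_data_pointers content → Spec_replace_module_data_pointers content (replace_module_data_pointers content)

-- ===== LEMMAS AND PROOFS =====
set_option maxRecDepth 20000

-- A clean recursion equivalent to PySem.Chars.replace (for a nonempty needle)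
def repl1 (old new : List Char) : List Char → List Char
  | [] => []
  | c :: t =>
    if old.isPrefixOf (c :: t) then new ++ repl1 old new (t.drop (old.length - 1))
    else c :: repl1 old new t
  termination_by l => l.length
  decreasing_by
  all_goals simp

lemma repl1_nil (old new : List Char) : repl1 old new [] = [] := by simp [repl1]

lemma repl1_cons_pos (old new : List Char) (c : Char) (t : List Char) (h : old <+: (c :: t)) :
    repl1 old new (c :: t) = new ++ repl1 old new (t.drop (old.length - 1)) := by
  rw [repl1]; simp [List.isPrefixOf_iff_prefix.mpr h]

lemma repl1_cons_neg (old new : List Char) (c : Char) (t : List Char) (h : ¬ old <+: (c :: t)) :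
    repl1 old new (c :: t) = c :: repl1 old new t := by
  rw [repl1, if_neg (fun hc => h (List.isPrefixOf_iff_prefix.mp hc))]

lemma go_eq (old new : List Char) (hold : old ≠ []) :
    ∀ (fuel : Nat) (l acc : List Char), l.length ≤ fuel →
      PySem.Chars.replace.go old new fuel l acc = acc.reverse ++ repl1 old new l := by
  intro fuel
  induction fuel with
  | zero =>
    intro l acc h
    have hl : l = [] := by cases l with
      | nil => rfl
      | cons c t => simp at h
    subst hl
    rw [PySem.Chars.replace.go.eq_def]
    simp [repl1_nil]
  | succ n ih =>
    intro l acc h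
    cases l with
    | nil =>
      rw [PySem.Chars.replace.go.eq_def]
      simp [repl1_nil]
    | cons c t =>
      rw [PySem.Chars.replace.go.eq_def]
      have holdlen : 1 ≤ old.length := by
        cases old with
        | nil => exact absurd rfl hold
        | cons o os => simp
      by_cases hp : old.isPrefixOf (c :: t) = true
      · simp only [hp, if_true]
        rw [ih (List.drop old.length (c :: t)) (new.reverse ++ acc)
            (by simp at h ⊢; omega)]
        rw [repl1_cons_pos old new c t (List.isPrefixOf_iff_prefix.mp hp)]
        have hdrop : List.drop old.length (c :: t) = t.drop (old.length - 1) := by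
          cases old with
          | nil => exact absurd rfl hold
          | cons o os => simp
        rw [hdrop]
        simp
      · simp only [hp]
        rw [ih t (c :: acc) (by simp at h ⊢; omega)]
        rw [repl1_cons_neg old new c t (fun hc => hp (List.isPrefixOf_iff_prefix.mpr hc))]
        simp

lemma chars_replace_eq (s old new : List Char) (hold : old ≠ []) :
    PySem.Chars.replace s old new = repl1 old new s := by
  unfold PySem.Chars.replace
  have he : old.isEmpty = false := by
    cases old with
    | nil => exact absurd rfl hold
    | cons o os => rfl
  rw [he]
  simp only [Bool.false_eq_true, if_false]
  rw [go_eq old new hold s.length s [] le_rfl]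
  simp

def pvStep (acc : List Char) (p : List Char × List Char) : List Char := repl1 p.1 p.2 acc

def pvPairs : List (List Char × List Char) :=
  pvReplacements.items.map (fun p => (p.1.toList, p.2.toList))

def pvFoldR (l : List Char) : List Char := pvPairs.foldl pvStep l

lemma foldA_toList : ∀ (prs : List (String × String)) (s : String),
    (prs.foldl (fun acc p => PySem.Str.replace acc p.1 p.2) s).toList
      = (prs.map (fun p => (p.1.toList, p.2.toList))).foldl
          (fun acc p => PySem.Chars.replace acc p.1 p.2) s.toList := by
  intro prs
  induction prs with
  | nil => intro s; rfl
  | cons p ps ih =>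
    intro s
    simp only [List.foldl_cons, List.map_cons]
    rw [ih, PySem.Str.toList_replace]

lemma foldC_eq_foldStep : ∀ (ps : List (List Char × List Char)), (∀ p ∈ ps, p.1 ≠ []) →
    ∀ l, ps.foldl (fun acc p => PySem.Chars.replace acc p.1 p.2) l = ps.foldl pvStep l := by
  intro ps
  induction ps with
  | nil => intro _ l; rfl
  | cons p ps' ih =>
    intro hne l
    simp only [List.foldl_cons]
    rw [chars_replace_eq l p.1 p.2 (hne p (by simp))]
    exact ih (fun q hq => hne q (by simp [hq])) _

lemma portA_toList (content : String) :
    (replace_module_data_pointers content).toList = pvFoldR content.toList := by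
  unfold replace_module_data_pointers pvFoldR
  rw [foldA_toList]
  exact foldC_eq_foldStep _ (by decide) content.toList

-- `pvBlocks k v`: no suffix of v can begin an occurrence of k, so repl1 k w passes v ++ · through
def pvBlocks (k v : List Char) : Bool :=
  v.tails.all (fun s => s.isEmpty || (!(k.isPrefixOf s) && !(s.isPrefixOf k)))

lemma prefix_append_cases {k v x : List Char} (h : k <+: v ++ x) : k <+: v ∨ v <+: k := by
  rcases le_or_gt k.length v.length with hle | hlt
  · left
    have hk := List.prefix_iff_eq_take.mp h
    rw [List.take_append_of_le_length hle] at hk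
    exact hk ▸ List.take_prefix _ _
  · right
    have hk := List.prefix_iff_eq_take.mp h
    have hv : v = k.take v.length := by
      rw [hk, List.take_take, min_eq_left (le_of_lt hlt)]
      exact List.take_left.symm
    exact hv ▸ List.take_prefix _ _

lemma repl1_blocks_append (k w : List Char) :
    ∀ (v x : List Char), pvBlocks k v = true → repl1 k w (v ++ x) = v ++ repl1 k w x := by
  intro v
  induction v with
  | nil => intro x _; simp
  | cons c v' ih =>
    intro x hb
    unfold pvBlocks at hb
    rw [List.tails_cons] at hb
    simp only [List.all_cons, Bool.and_eq_true] at hb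
    obtain ⟨hhead, htail⟩ := hb
    simp only [List.isEmpty_cons, Bool.false_or, Bool.and_eq_true, Bool.not_eq_true'] at hhead
    have hnp : ¬ k <+: (c :: v') ++ x := by
      intro hc
      rcases prefix_append_cases hc with h1 | h2
      · rw [← List.isPrefixOf_iff_prefix] at h1
        simp [h1] at hhead
      · rw [← List.isPrefixOf_iff_prefix] at h2
        simp [h2] at hhead
    rw [List.cons_append, repl1_cons_neg _ _ _ _ (by rw [← List.cons_append]; exact hnp)]
    rw [ih x (by unfold pvBlocks; exact htail)]
    rfl

lemma repl1_head_key (k w x : List Char) (hk : k ≠ []) :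
    repl1 k w (k ++ x) = w ++ repl1 k w x := by
  cases k with
  | nil => exact absurd rfl hk
  | cons c k' =>
    rw [List.cons_append, repl1_cons_pos _ _ _ _ (by rw [← List.cons_append]; exact List.prefix_append _ _)]
    congr 2
    simp

lemma repl1_reflect (k' v' : List Char) :
    ∀ (n : Nat) (t w : List Char), t.length ≤ n → (∀ c ∈ w, c ≠ 'S') →
      w <+: repl1 ('S' :: k') ('S' :: v') t → w <+: t := by
  intro n
  induction n with
  | zero =>
    intro t w ht _ h
    have hl : t = [] := by cases t with
      | nil => rfl
      | cons c u => simp at ht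
    subst hl
    rwa [repl1_nil] at h
  | succ n ih =>
    intro t w ht hw h
    cases t with
    | nil => rwa [repl1_nil] at h
    | cons c t' =>
      by_cases hp : ('S' :: k') <+: (c :: t')
      · rw [repl1_cons_pos _ _ _ _ hp] at h
        cases w with
        | nil => exact List.nil_prefix
        | cons d w' =>
          obtain ⟨r, hr⟩ := h
          simp only [List.cons_append] at hr
          have hd : d = 'S' := (List.cons.inj hr).1
          exact absurd hd (hw d (by simp))
      · rw [repl1_cons_neg _ _ _ _ hp] at h
        cases w with
        | nil => exact List.nil_prefix
        | cons d w' =>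
          obtain ⟨r, hr⟩ := h
          simp only [List.cons_append] at hr
          obtain ⟨hd, htl⟩ := List.cons.inj hr
          have hw' : w' <+: t' :=
            ih t' w' (by simp at ht; omega) (fun e he => hw e (by simp [he])) ⟨r, htl⟩
          exact List.cons_prefix_cons.mpr ⟨hd, hw'⟩

lemma pvPairs_heads : ∀ p ∈ pvPairs, ∃ k' v', p.1 = 'S' :: k' ∧ p.2 = 'S' :: v' ∧ (∀ c ∈ k', c ≠ 'S') := by
  have hall : ∀ q ∈ pvPairs, q.1.head? = some 'S' ∧ q.2.head? = some 'S'
      ∧ q.1.tail.all (fun c => c != 'S') = true := by decide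
  intro p hp
  obtain ⟨h1, h2, h3⟩ := hall p hp
  cases hc1 : p.1 with
  | nil => rw [hc1] at h1; simp at h1
  | cons a k' =>
    cases hc2 : p.2 with
    | nil => rw [hc2] at h2; simp at h2
    | cons b v' =>
      rw [hc1] at h1 h3
      rw [hc2] at h2
      simp only [List.head?_cons, Option.some.injEq] at h1 h2
      exact ⟨k', v', by rw [h1], by rw [h2], by simpa using h3⟩

lemma fold_cons_aux (c : Char) (t : List Char) (hnot : ∀ p ∈ pvPairs, ¬ p.1 <+: (c :: t)) :
    ∀ (ps : List (List Char × List Char)), (∀ p ∈ ps, p ∈ pvPairs) →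
      ∀ u, (∀ p ∈ pvPairs, p.1 <+: (c :: u) → p.1 <+: (c :: t)) →
        ps.foldl pvStep (c :: u) = c :: ps.foldl pvStep u := by
  intro ps
  induction ps with
  | nil => intro _ u _; rfl
  | cons p ps' ih =>
    intro hsub u hinv
    have hpmem : p ∈ pvPairs := hsub p (by simp)
    have hnp : ¬ p.1 <+: (c :: u) := fun hc => hnot p hpmem (hinv p hpmem hc)
    simp only [List.foldl_cons]
    have hstep : pvStep (c :: u) p = c :: pvStep u p := repl1_cons_neg p.1 p.2 c u hnp
    rw [hstep]
    apply ih (fun q hq => hsub q (by simp [hq]))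
    intro q hq hqpre
    obtain ⟨kq', vq', hq1, _, hq3⟩ := pvPairs_heads q hq
    obtain ⟨kp', vp', hp1, hp2, _⟩ := pvPairs_heads p hpmem
    apply hinv q hq
    rw [hq1] at hqpre ⊢
    obtain ⟨r, hr⟩ := hqpre
    simp only [List.cons_append] at hr
    obtain ⟨hS, hr2⟩ := List.cons.inj hr
    have hkq : kq' <+: u := by
      apply repl1_reflect kp' vp' u.length u kq' le_rfl hq3
      have : pvStep u p = repl1 ('S' :: kp') ('S' :: vp') u := by
        unfold pvStep; rw [hp1, hp2]
      exact ⟨r, by rw [← this]; exact hr2⟩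
    exact List.cons_prefix_cons.mpr ⟨hS, hkq⟩

lemma fold_blocks : ∀ (ps : List (List Char × List Char)) (v : List Char),
    (∀ p ∈ ps, pvBlocks p.1 v = true) →
    ∀ x, ps.foldl pvStep (v ++ x) = v ++ ps.foldl pvStep x := by
  intro ps
  induction ps with
  | nil => intro v _ x; rfl
  | cons p ps' ih =>
    intro v hb x
    simp only [List.foldl_cons]
    have : pvStep (v ++ x) p = v ++ pvStep x p :=
      repl1_blocks_append p.1 p.2 v x (hb p (by simp))
    rw [this]
    exact ih v (fun q hq => hb q (by simp [hq])) _

lemma fold_key (pre post : List (List Char × List Char)) (k v : List Char)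
    (hsplit : pvPairs = pre ++ (k, v) :: post) (hk : k ≠ [])
    (h1 : ∀ p ∈ pre, pvBlocks p.1 k = true) (h2 : ∀ p ∈ post, pvBlocks p.1 v = true)
    (x : List Char) : pvFoldR (k ++ x) = v ++ pvFoldR x := by
  unfold pvFoldR
  rw [hsplit, List.foldl_append, List.foldl_append]
  rw [fold_blocks pre k h1 x]
  simp only [List.foldl_cons]
  have hstep : pvStep (k ++ pre.foldl pvStep x) (k, v)
      = v ++ repl1 k v (pre.foldl pvStep x) := repl1_head_key k v _ hk
  rw [hstep, fold_blocks post v h2]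
  rfl

lemma lenP : pvPrefixB.toList.length = 23 := by decide

lemma lenP' : pvPrefixB.length = 23 := by decide

lemma pvScanB_cons (c : Char) (t : List Char) :
    pvScanB (c :: t) =
      if pvPrefixB.toList.isPrefixOf (c :: t)
          && (pvNamesB.get? (String.ofList (((c :: t).drop 23).take 2))).isSome then
        pvPrefixB.toList ++ ((pvNamesB.get? (String.ofList (((c :: t).drop 23).take 2))).getD "").toList
          ++ pvScanB ((c :: t).drop 25)
      else
        c :: pvScanB t := by
  rw [pvScanB]

lemma take_two_left (d1 d2 : Char) (r : List Char) : ([d1, d2] ++ r).take 2 = [d1, d2] := by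
  simp

lemma main_key_case (k v : List Char) (d1 d2 : Char) (nm : String)
    (hk : k = pvPrefixB.toList ++ [d1, d2]) (hv : v = pvPrefixB.toList ++ nm.toList)
    (hget : pvNamesB.get? (String.ofList [d1, d2]) = some nm)
    (hfold : ∀ x, pvFoldR (k ++ x) = v ++ pvFoldR x)
    (x : List Char) (hIH : pvFoldR x = pvScanB x) :
    pvFoldR (k ++ x) = pvScanB (k ++ x) := by
  rw [hfold, hIH]
  cases hck : k with
  | nil =>
    exfalso
    rw [hck] at hk
    have h := congrArg List.length hk
    simp [lenP'] at h
  | cons c kt =>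
    rw [List.cons_append, pvScanB_cons]
    have hl : c :: (kt ++ x) = pvPrefixB.toList ++ ([d1, d2] ++ x) := by
      rw [← List.cons_append, ← hck, hk, List.append_assoc]
    rw [hl]
    rw [List.drop_left' lenP, take_two_left, hget]
    have hd25 : (pvPrefixB.toList ++ ([d1, d2] ++ x)).drop 25 = x := by
      rw [← List.append_assoc]
      exact List.drop_left' (by simp [lenP'])
    rw [hd25]
    simp only [List.isPrefixOf_iff_prefix.mpr (List.prefix_append _ _), Option.isSome_some,
      Bool.and_self, if_true, Option.getD_some]
    rw [hv]

lemma match_of_key_prefix (d1 d2 : Char) (nm : String)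
    (hget : pvNamesB.get? (String.ofList [d1, d2]) = some nm) (c : Char) (t : List Char)
    (h : (pvPrefixB.toList ++ [d1, d2]) <+: (c :: t)) :
    (pvPrefixB.toList.isPrefixOf (c :: t)
      && (pvNamesB.get? (String.ofList (((c :: t).drop 23).take 2))).isSome) = true := by
  obtain ⟨r, hr⟩ := h
  rw [← hr, List.append_assoc]
  rw [List.drop_left' lenP, take_two_left, hget]
  simp [List.isPrefixOf_iff_prefix.mpr (List.prefix_append _ _)]

lemma keys_enum : ∀ p ∈ pvPairs, ∃ d1 d2 nm,
    p.1 = pvPrefixB.toList ++ [d1, d2] ∧ pvNamesB.get? (String.ofList [d1, d2]) = some nm := by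
  have hall : ∀ q ∈ pvPairs, q.1.take 23 = pvPrefixB.toList ∧ q.1.length = 25
      ∧ (pvNamesB.get? (String.ofList (q.1.drop 23))).isSome = true := by decide
  intro p hp
  obtain ⟨h1, h2, h3⟩ := hall p hp
  have hsplit : p.1 = p.1.take 23 ++ p.1.drop 23 := (List.take_append_drop 23 p.1).symm
  have hlen2 : (p.1.drop 23).length = 2 := by rw [List.length_drop, h2]
  obtain ⟨d1, d2, hd⟩ : ∃ d1 d2, p.1.drop 23 = [d1, d2] := by
    cases hc : p.1.drop 23 with
    | nil => rw [hc] at hlen2; simp at hlen2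
    | cons a r =>
      cases hr : r with
      | nil => rw [hc, hr] at hlen2; simp at hlen2
      | cons b r' =>
        rw [hc, hr] at hlen2
        simp at hlen2
        exact ⟨a, b, by simp [hlen2]⟩
  obtain ⟨nm, hnm⟩ := Option.isSome_iff_exists.mp
    (show (pvNamesB.get? (String.ofList [d1, d2])).isSome = true by rw [← hd]; exact h3)
  exact ⟨d1, d2, nm, by rw [hsplit, h1, hd], hnm⟩

set_option maxHeartbeats 2000000 in
lemma names_get?_dom (s nm : String) (h : pvNamesB.get? s = some nm) :
    s = "08" ∨ s = "09" ∨ s = "10" ∨ s = "11" ∨ s = "12" ∨ s = "13" ∨ s = "14" ∨ s = "15" ∨ s = "16" ∨ s = "17" ∨ s = "18" ∨ s = "19" ∨ s = "20" := by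
  have he : pvNamesB = PySem.Dict.mk [
    ("08", "ParticleCore"),
    ("09", "AudioEngine"),
    ("10", "GraphicsEngine"),
    ("11", "PhysicsEngine"),
    ("12", "NetworkEngine"),
    ("13", "InputEngine"),
    ("14", "ResourceEngine"),
    ("15", "AnimationEngine"),
    ("16", "ParticleEngine"),
    ("17", "SystemCore"),
    ("18", "SystemEngine"),
    ("19", "RenderCore"),
    ("20", "RenderEngine")] := by decide
  rw [he] at h
  rw [PySem.Dict.get?_mk_cons] at h
  by_cases h08 : (("08" : String) == s) = true
  · exact Or.inl (beq_iff_eq.mp h08).symm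
  rw [if_neg h08] at h
  rw [PySem.Dict.get?_mk_cons] at h
  by_cases h09 : (("09" : String) == s) = true
  · exact Or.inr (Or.inl (beq_iff_eq.mp h09).symm)
  rw [if_neg h09] at h
  rw [PySem.Dict.get?_mk_cons] at h
  by_cases h10 : (("10" : String) == s) = true
  · exact Or.inr (Or.inr (Or.inl (beq_iff_eq.mp h10).symm))
  rw [if_neg h10] at h
  rw [PySem.Dict.get?_mk_cons] at h
  by_cases h11 : (("11" : String) == s) = true
  · exact Or.inr (Or.inr (Or.inr (Or.inl (beq_iff_eq.mp h11).symm)))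
  rw [if_neg h11] at h
  rw [PySem.Dict.get?_mk_cons] at h
  by_cases h12 : (("12" : String) == s) = true
  · exact Or.inr (Or.inr (Or.inr (Or.inr (Or.inl (beq_iff_eq.mp h12).symm))))
  rw [if_neg h12] at h
  rw [PySem.Dict.get?_mk_cons] at h
  by_cases h13 : (("13" : String) == s) = true
  · exact Or.inr (Or.inr (Or.inr (Or.inr (Or.inr (Or.inl (beq_iff_eq.mp h13).symm)))))
  rw [if_neg h13] at h
  rw [PySem.Dict.get?_mk_cons] at h
  by_cases h14 : (("14" : String) == s) = true
  · exact Or.inr (Or.inr (Or.inr (Or.inr (Or.inr (Or.inr (Or.inl (beq_iff_eq.mp h14).symm))))))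
  rw [if_neg h14] at h
  rw [PySem.Dict.get?_mk_cons] at h
  by_cases h15 : (("15" : String) == s) = true
  · exact Or.inr (Or.inr (Or.inr (Or.inr (Or.inr (Or.inr (Or.inr (Or.inl (beq_iff_eq.mp h15).symm)))))))
  rw [if_neg h15] at h
  rw [PySem.Dict.get?_mk_cons] at h
  by_cases h16 : (("16" : String) == s) = true
  · exact Or.inr (Or.inr (Or.inr (Or.inr (Or.inr (Or.inr (Or.inr (Or.inr (Or.inl (beq_iff_eq.mp h16).symm))))))))
  rw [if_neg h16] at h
  rw [PySem.Dict.get?_mk_cons] at h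
  by_cases h17 : (("17" : String) == s) = true
  · exact Or.inr (Or.inr (Or.inr (Or.inr (Or.inr (Or.inr (Or.inr (Or.inr (Or.inr (Or.inl (beq_iff_eq.mp h17).symm)))))))))
  rw [if_neg h17] at h
  rw [PySem.Dict.get?_mk_cons] at h
  by_cases h18 : (("18" : String) == s) = true
  · exact Or.inr (Or.inr (Or.inr (Or.inr (Or.inr (Or.inr (Or.inr (Or.inr (Or.inr (Or.inr (Or.inl (beq_iff_eq.mp h18).symm))))))))))
  rw [if_neg h18] at h
  rw [PySem.Dict.get?_mk_cons] at h
  by_cases h19 : (("19" : String) == s) = true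
  · exact Or.inr (Or.inr (Or.inr (Or.inr (Or.inr (Or.inr (Or.inr (Or.inr (Or.inr (Or.inr (Or.inr (Or.inl (beq_iff_eq.mp h19).symm)))))))))))
  rw [if_neg h19] at h
  rw [PySem.Dict.get?_mk_cons] at h
  by_cases h20 : (("20" : String) == s) = true
  · exact Or.inr (Or.inr (Or.inr (Or.inr (Or.inr (Or.inr (Or.inr (Or.inr (Or.inr (Or.inr (Or.inr (Or.inr ((beq_iff_eq.mp h20).symm))))))))))))
  rw [if_neg h20] at h
  simp [PySem.Dict.get?] at h

-- one key-matched step of the main induction, fully generic in the key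
lemma key_branch (c : Char) (t : List Char) (d1 d2 : Char) (nm : String) (k v : List Char)
    (hk : k = pvPrefixB.toList ++ [d1, d2]) (hv : v = pvPrefixB.toList ++ nm.toList)
    (hget : pvNamesB.get? (String.ofList [d1, d2]) = some nm)
    (hfold : ∀ x, pvFoldR (k ++ x) = v ++ pvFoldR x)
    (hpre : pvPrefixB.toList.isPrefixOf (c :: t) = true)
    (hs : String.ofList (((c :: t).drop 23).take 2) = String.ofList [d1, d2])
    (hIH : ∀ x, c :: t = k ++ x → pvFoldR x = pvScanB x) :
    pvFoldR (c :: t) = pvScanB (c :: t) := by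
  obtain ⟨r, hr⟩ := List.isPrefixOf_iff_prefix.mp hpre
  have hdrop : (c :: t).drop 23 = r := by rw [← hr, List.drop_left' lenP]
  have ht2 : r.take 2 = [d1, d2] := by
    have h' := congrArg String.toList hs
    rw [String.toList_ofList, String.toList_ofList, hdrop] at h'
    exact h'
  obtain ⟨x, hx⟩ : ∃ x, r = d1 :: d2 :: x := by
    cases r with
    | nil => simp at ht2
    | cons a r' =>
      cases r' with
      | nil => simp at ht2
      | cons b r'' =>
        simp only [List.take_succ_cons, List.take_zero, List.cons.injEq, and_true] at ht2
        exact ⟨r'', by rw [ht2.1, ht2.2]⟩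
  have hl : c :: t = k ++ x := by
    rw [← hr, hx, hk, List.append_assoc]
    rfl
  rw [hl]
  exact main_key_case k v d1 d2 nm hk hv hget hfold x (hIH x hl)

lemma foldR_nil : pvFoldR [] = [] := by
  unfold pvFoldR
  have : ∀ (ps : List (List Char × List Char)), ps.foldl pvStep [] = [] := by
    intro ps
    induction ps with
    | nil => rfl
    | cons p ps' ih => simpa [pvStep, repl1_nil] using ih
  exact this pvPairs

set_option maxHeartbeats 4000000 in
lemma foldR_eq_scan : ∀ (n : Nat) (l : List Char), l.length ≤ n → pvFoldR l = pvScanB l := by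
  intro n
  induction n with
  | zero =>
    intro l h
    have hl : l = [] := by cases l with
      | nil => rfl
      | cons c t => simp at h
    subst hl
    rw [foldR_nil]
    simp [pvScanB]
  | succ n ih =>
    intro l hlen
    cases l with
    | nil =>
      rw [foldR_nil]
      simp [pvScanB]
    | cons c t =>
      have hIH' : ∀ (k x : List Char), k.length = 25 → c :: t = k ++ x → pvFoldR x = pvScanB x := by
        intro k x hkl hx
        apply ih
        have := congrArg List.length hx
        simp [hkl] at this
        simp at hlen
        omega
      by_cases hcond : (pvPrefixB.toList.isPrefixOf (c :: t)
          && (pvNamesB.get? (String.ofList (((c :: t).drop 23).take 2))).isSome) = true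
      · have hpre := Bool.and_elim_left hcond
        have hsome := Bool.and_elim_right hcond
        obtain ⟨nm, hnm⟩ := Option.isSome_iff_exists.mp hsome
        rcases names_get?_dom _ _ hnm with hs|hs|hs|hs|hs|hs|hs|hs|hs|hs|hs|hs|hs
        · exact key_branch c t '0' '8' "ParticleCore"
            ("SystemModuleDataPointer08".toList) ("SystemModuleDataPointerParticleCore".toList) (by decide) (by decide) (by decide)
            (fold_key (pvPairs.take 0) (pvPairs.drop 1) _ _ (by decide) (by decide) (by decide) (by decide))
            hpre (by rw [hs]; try decide) (fun x hx => hIH' _ x (by decide) hx)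
        · exact key_branch c t '0' '9' "AudioEngine"
            ("SystemModuleDataPointer09".toList) ("SystemModuleDataPointerAudioEngine".toList) (by decide) (by decide) (by decide)
            (fold_key (pvPairs.take 1) (pvPairs.drop 2) _ _ (by decide) (by decide) (by decide) (by decide))
            hpre (by rw [hs]; try decide) (fun x hx => hIH' _ x (by decide) hx)
        · exact key_branch c t '1' '0' "GraphicsEngine"
            ("SystemModuleDataPointer10".toList) ("SystemModuleDataPointerGraphicsEngine".toList) (by decide) (by decide) (by decide)
            (fold_key (pvPairs.take 2) (pvPairs.drop 3) _ _ (by decide) (by decide) (by decide) (by decide))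
            hpre (by rw [hs]; try decide) (fun x hx => hIH' _ x (by decide) hx)
        · exact key_branch c t '1' '1' "PhysicsEngine"
            ("SystemModuleDataPointer11".toList) ("SystemModuleDataPointerPhysicsEngine".toList) (by decide) (by decide) (by decide)
            (fold_key (pvPairs.take 3) (pvPairs.drop 4) _ _ (by decide) (by decide) (by decide) (by decide))
            hpre (by rw [hs]; try decide) (fun x hx => hIH' _ x (by decide) hx)
        · exact key_branch c t '1' '2' "NetworkEngine"
            ("SystemModuleDataPointer12".toList) ("SystemModuleDataPointerNetworkEngine".toList) (by decide) (by decide) (by decide)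
            (fold_key (pvPairs.take 4) (pvPairs.drop 5) _ _ (by decide) (by decide) (by decide) (by decide))
            hpre (by rw [hs]; try decide) (fun x hx => hIH' _ x (by decide) hx)
        · exact key_branch c t '1' '3' "InputEngine"
            ("SystemModuleDataPointer13".toList) ("SystemModuleDataPointerInputEngine".toList) (by decide) (by decide) (by decide)
            (fold_key (pvPairs.take 5) (pvPairs.drop 6) _ _ (by decide) (by decide) (by decide) (by decide))
            hpre (by rw [hs]; try decide) (fun x hx => hIH' _ x (by decide) hx)
        · exact key_branch c t '1' '4' "ResourceEngine"
            ("SystemModuleDataPointer14".toList) ("SystemModuleDataPointerResourceEngine".toList) (by decide) (by decide) (by decide)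
            (fold_key (pvPairs.take 6) (pvPairs.drop 7) _ _ (by decide) (by decide) (by decide) (by decide))
            hpre (by rw [hs]; try decide) (fun x hx => hIH' _ x (by decide) hx)
        · exact key_branch c t '1' '5' "AnimationEngine"
            ("SystemModuleDataPointer15".toList) ("SystemModuleDataPointerAnimationEngine".toList) (by decide) (by decide) (by decide)
            (fold_key (pvPairs.take 7) (pvPairs.drop 8) _ _ (by decide) (by decide) (by decide) (by decide))
            hpre (by rw [hs]; try decide) (fun x hx => hIH' _ x (by decide) hx)
        · exact key_branch c t '1' '6' "ParticleEngine"
            ("SystemModuleDataPointer16".toList) ("SystemModuleDataPointerParticleEngine".toList) (by decide) (by decide) (by decide)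
            (fold_key (pvPairs.take 8) (pvPairs.drop 9) _ _ (by decide) (by decide) (by decide) (by decide))
            hpre (by rw [hs]; try decide) (fun x hx => hIH' _ x (by decide) hx)
        · exact key_branch c t '1' '7' "SystemCore"
            ("SystemModuleDataPointer17".toList) ("SystemModuleDataPointerSystemCore".toList) (by decide) (by decide) (by decide)
            (fold_key (pvPairs.take 9) (pvPairs.drop 10) _ _ (by decide) (by decide) (by decide) (by decide))
            hpre (by rw [hs]; try decide) (fun x hx => hIH' _ x (by decide) hx)
        · exact key_branch c t '1' '8' "SystemEngine"
            ("SystemModuleDataPointer18".toList) ("SystemModuleDataPointerSystemEngine".toList) (by decide) (by decide) (by decide)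
            (fold_key (pvPairs.take 10) (pvPairs.drop 11) _ _ (by decide) (by decide) (by decide) (by decide))
            hpre (by rw [hs]; try decide) (fun x hx => hIH' _ x (by decide) hx)
        · exact key_branch c t '1' '9' "RenderCore"
            ("SystemModuleDataPointer19".toList) ("SystemModuleDataPointerRenderCore".toList) (by decide) (by decide) (by decide)
            (fold_key (pvPairs.take 11) (pvPairs.drop 12) _ _ (by decide) (by decide) (by decide) (by decide))
            hpre (by rw [hs]; try decide) (fun x hx => hIH' _ x (by decide) hx)
        · exact key_branch c t '2' '0' "RenderEngine"
            ("SystemModuleDataPointer20".toList) ("SystemModuleDataPointerRenderEngine".toList) (by decide) (by decide) (by decide)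
            (fold_key (pvPairs.take 12) (pvPairs.drop 13) _ _ (by decide) (by decide) (by decide) (by decide))
            hpre (by rw [hs]; try decide) (fun x hx => hIH' _ x (by decide) hx)
      · have hnot : ∀ p ∈ pvPairs, ¬ p.1 <+: (c :: t) := by
          intro p hp hppre
          obtain ⟨d1, d2, nm, hpk, hget⟩ := keys_enum p hp
          exact hcond (match_of_key_prefix d1 d2 nm hget c t (hpk ▸ hppre))
        have hstep : pvFoldR (c :: t) = c :: pvFoldR t := by
          unfold pvFoldR
          exact fold_cons_aux c t hnot pvPairs (fun p hp => hp) t (fun p _ h => h)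
        rw [hstep, ih t (by simp at hlen; omega), pvScanB_cons, if_neg (by simpa using hcond)]

-- ===== VERDICT (by name: the statement is the Claim_ definition above) =====
theorem replace_module_data_pointers_spec : Claim_equal_replace_module_data_pointers := by
  intro content _
  unfold Spec_replace_module_data_pointers
  apply String.toList_inj.mp
  rw [portA_toList]
  unfold replace_module_data_pointers_alt
  rw [String.toList_ofList]
  exact foldR_eq_scan _ _ le_rfl
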